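-- pv_equiv track=rewrite | github.com/adamschmalhofer/8vim_keyboard_layout_file_generator | 8vim_keyboard_layout_file_generator.py | movement_sequence
-- ===== SOURCE A (Python) =====
-- DIRECTIONS = ['TOP', 'LEFT', 'BOTTOM', 'RIGHT']
--
-- def movement_sequence(start_at, clockwise, steps):
--     sequence = [start_at]
--     i = DIRECTIONS.index(start_at)
--     direction = (-1 if clockwise else 1)
--     for circular_distance in steps:
--         for sector in range(0, circular_distance):
--             i += direction
--             sequence.append(DIRECTIONS[i % len(DIRECTIONS)])
--         direction *= -1
--     return f"        <movementSequence>INSIDE_CIRCLE;{';'.join(sequence)};INSIDE_CIRCLE;</movementSequence>"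
-- ===== SOURCE B (Python) =====
-- DIRECTIONS = ['TOP', 'LEFT', 'BOTTOM', 'RIGHT']
--
--
-- def movement_sequence(start_at, clockwise, steps):
--     # Chunk-level algorithm: instead of stepping an index once per sector, each
--     # chunk emits a 4-name rotation "ring" (obtained by slicing a doubled copy of
--     # DIRECTIONS, reversed for the counter direction), replicated ring*q plus a
--     # ring[:r] remainder with q, r = divmod(count, 4).
--     i = DIRECTIONS.index(start_at)
--     sign = -1 if clockwise else 1
--     parts = [start_at]
--     for count in steps:
--         if count > 0:
--             if sign == 1:
--                 ring = (DIRECTIONS * 2)[i + 1:i + 5]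
--             else:
--                 ring = (DIRECTIONS[::-1] * 2)[4 - i:8 - i]
--             q, r = divmod(count, 4)
--             parts.extend(ring * q + ring[:r])
--             i = (i + sign * count) % 4
--         sign = -sign
--     return f"        <movementSequence>INSIDE_CIRCLE;{';'.join(parts)};INSIDE_CIRCLE;</movementSequence>"
-- ===== Notes on version B (the rewrite author's own statement) =====
-- stated objective: alternative
-- what changed: Replaces A's per-sector index stepping (one mod-lookup per unit move) with a chunk-level algorithm: each chunk builds its 4-name rotation ring by slicing a doubled (possibly reversed) copy of DIRECTIONS, then emits ring*q + ring[:r] with q, r = divmod(count, 4), updating the index once per chunk.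
import Mathlib
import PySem

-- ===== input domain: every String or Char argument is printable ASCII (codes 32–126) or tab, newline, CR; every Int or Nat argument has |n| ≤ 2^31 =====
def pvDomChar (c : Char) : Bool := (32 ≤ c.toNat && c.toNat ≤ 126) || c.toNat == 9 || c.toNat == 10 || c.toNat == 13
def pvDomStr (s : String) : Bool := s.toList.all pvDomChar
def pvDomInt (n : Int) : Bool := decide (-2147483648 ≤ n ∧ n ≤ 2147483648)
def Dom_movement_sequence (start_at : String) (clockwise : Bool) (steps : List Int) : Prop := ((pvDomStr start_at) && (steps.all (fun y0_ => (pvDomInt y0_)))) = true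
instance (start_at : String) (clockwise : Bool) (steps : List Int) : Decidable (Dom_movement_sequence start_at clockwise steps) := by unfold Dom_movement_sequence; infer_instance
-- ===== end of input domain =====

-- B replaces A's per-sector index stepping with a chunk-level ring-slice + replication (divmod) algorithm; alternative decomposition, same output cost.


def pvDirs : List String := ["TOP", "LEFT", "BOTTOM", "RIGHT"]

-- ===== PORT A =====
-- literal port: sequence list + index counter i + flipping direction, nested foldl over steps and range(0, c).
-- The growing sequence list is carried in reverse (cons instead of append, one final reverse): same loop,
-- same state, same appended values — Python's O(1) list.append made O(1) here too.
def movement_sequence (start_at : String) (clockwise : Bool) (steps : List Int) : String :=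
  match PySem.List.index? pvDirs start_at with
  | none => ""   -- unreachable under Pre_ (Python raises ValueError here)
  | some i0 =>
    let st := steps.foldl
      (fun (st : List String × Int × Int) circular_distance =>
        let inner := (PySem.List.pyRange 0 circular_distance 1).foldl
          (fun (p : List String × Int) _ =>
            let i := p.2 + st.2.2
            ((PySem.List.pyGet? pvDirs (PySem.Int.mod i (pvDirs.length : Int))).getD "" :: p.1, i))
          (st.1, st.2.1)
        (inner.1, inner.2, st.2.2 * (-1)))
      ([start_at], ((i0 : Int), (if clockwise then (-1 : Int) else 1)))
    "        <movementSequence>INSIDE_CIRCLE;" ++ PySem.Str.join ";" st.1.reverse ++ ";INSIDE_CIRCLE;</movementSequence>"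

-- ===== PORT B =====
-- literal port of Source B: per chunk, build the 4-name rotation ring by slicing a doubled
-- (possibly reversed) copy of DIRECTIONS, then emit ring * q ++ ring[:r] with
-- q, r = divmod(count, 4), and update the index once per chunk (mod 4).
def movement_sequence_alt (start_at : String) (clockwise : Bool) (steps : List Int) : String :=
  match PySem.List.index? pvDirs start_at with
  | none => ""   -- unreachable under Pre_ (Python raises ValueError here)
  | some i0 =>
    let st := steps.foldl
      (fun (st : List String × Int × Int) count =>
        if count > 0 then
          let ring := if st.2.2 == 1
            then PySem.List.slice (PySem.List.pyRepeat pvDirs 2) (some (st.2.1 + 1)) (some (st.2.1 + 5))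
            else PySem.List.slice (PySem.List.pyRepeat ((PySem.List.slice? pvDirs none none (-1)).getD []) 2) (some (4 - st.2.1)) (some (8 - st.2.1))
          (st.1 ++ (PySem.List.pyRepeat ring (PySem.Int.floordiv count 4) ++ PySem.List.slice ring none (some (PySem.Int.mod count 4))),
           PySem.Int.mod (st.2.1 + st.2.2 * count) 4, st.2.2 * (-1))
        else (st.1, st.2.1, st.2.2 * (-1)))
      ([start_at], ((i0 : Int), (if clockwise then (-1 : Int) else 1)))
    "        <movementSequence>INSIDE_CIRCLE;" ++ PySem.Str.join ";" st.1 ++ ";INSIDE_CIRCLE;</movementSequence>"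

-- ===== PRECONDITION & SPEC =====
-- Pre_ excludes exactly the inputs where Python A raises ValueError (start_at not a direction name).
def Pre_movement_sequence (start_at : String) (clockwise : Bool) (steps : List Int) : Prop :=
  start_at ∈ pvDirs
instance (start_at : String) (clockwise : Bool) (steps : List Int) : Decidable (Pre_movement_sequence start_at clockwise steps) := by unfold Pre_movement_sequence; infer_instance
def pvWitness_movement_sequence : String × Bool × List Int := ("TOP", true, [2, 1, 0, 3])

def Spec_movement_sequence (start_at : String) (clockwise : Bool) (steps : List Int) (out : String) : Prop := out = movement_sequence_alt start_at clockwise steps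
instance (start_at : String) (clockwise : Bool) (steps : List Int) (out : String) : Decidable (Spec_movement_sequence start_at clockwise steps out) := by unfold Spec_movement_sequence; infer_instance

-- ===== CLAIM (what is proved, stated in full; the proofs are below) =====
def Claim_equal_movement_sequence : Prop := ∀ (start_at : String) (clockwise : Bool) (steps : List Int), Dom_movement_sequence start_at clockwise steps → Pre_movement_sequence start_at clockwise steps → Spec_movement_sequence start_at clockwise steps (movement_sequence start_at clockwise steps)

-- ===== LEMMAS AND PROOFS =====

-- name of direction with index k mod 4 (the lookup expression A inlines)
def pvName (k : Int) : String :=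
  (PySem.List.pyGet? pvDirs (PySem.Int.mod k (pvDirs.length : Int))).getD ""

-- names produced by one chunk of n unit moves of increment d starting from index i
def pvGen (d : Int) : Nat → Int → List String
  | 0, _ => []
  | n+1, i => pvName (i + d) :: pvGen d n (i + d)

-- reference result: names produced by all chunks
def pvSeqR (d i : Int) : List Int → List String
  | [] => []
  | c :: cs => pvGen d c.toNat i ++ pvSeqR (d * -1) (i + (c.toNat : Int) * d) cs

-- final (index, direction) of A's fold
def pvFin (d i : Int) : List Int → Int × Int
  | [] => (i, d)
  | c :: cs => pvFin (d * -1) (i + (c.toNat : Int) * d) cs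

theorem lemA_inner (d : Int) : ∀ (L : List Int) (seq : List String) (i : Int),
    L.foldl (fun (p : List String × Int) _ =>
        ((PySem.List.pyGet? pvDirs (PySem.Int.mod (p.2 + d) (pvDirs.length : Int))).getD "" :: p.1, p.2 + d))
      (seq, i)
    = ((pvGen d L.length i).reverse ++ seq, i + (L.length : Int) * d) := by
  intro L
  induction L with
  | nil => intro seq i; simp [pvGen]
  | cons x xs ih =>
    intro seq i
    simp only [List.foldl_cons, List.length_cons, pvGen, ih]
    simp only [Prod.mk.injEq, List.reverse_cons, List.append_assoc, List.singleton_append]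
    refine ⟨by simp [pvName], by push_cast; ring⟩

theorem lemA_outer : ∀ (steps : List Int) (seq : List String) (i d : Int),
    steps.foldl
      (fun (st : List String × Int × Int) circular_distance =>
        (((PySem.List.pyRange 0 circular_distance 1).foldl
          (fun (p : List String × Int) _ =>
            ((PySem.List.pyGet? pvDirs (PySem.Int.mod (p.2 + st.2.2) (pvDirs.length : Int))).getD "" :: p.1, p.2 + st.2.2))
          (st.1, st.2.1)).1,
         ((PySem.List.pyRange 0 circular_distance 1).foldl
          (fun (p : List String × Int) _ =>
            ((PySem.List.pyGet? pvDirs (PySem.Int.mod (p.2 + st.2.2) (pvDirs.length : Int))).getD "" :: p.1, p.2 + st.2.2))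
          (st.1, st.2.1)).2,
         st.2.2 * (-1)))
      (seq, (i, d))
    = ((pvSeqR d i steps).reverse ++ seq, pvFin d i steps) := by
  intro steps
  induction steps with
  | nil => intro seq i d; simp [pvSeqR, pvFin]
  | cons c cs ih =>
    intro seq i d
    simp only [List.foldl_cons]
    rw [lemA_inner d (PySem.List.pyRange 0 c 1) seq i]
    have hlen : (PySem.List.pyRange 0 c 1).length = c.toNat := by
      simp [PySem.List.length_pyRange_one]
    rw [hlen]
    simp only [pvSeqR, pvFin]
    rw [ih, List.reverse_append, List.append_assoc]

-- pvName depends only on the index mod 4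
theorem pvName_congr (k k' : Int) (h : (4 : Int) ∣ (k - k')) : pvName k = pvName k' := by
  unfold pvName
  have hlen : ((pvDirs.length : Nat) : Int) = 4 := by decide
  rw [hlen]
  have h4 : PySem.Int.mod k (4 : Int) = PySem.Int.mod k' 4 := by
    rw [PySem.Int.mod_eq_emod_of_pos (by norm_num), PySem.Int.mod_eq_emod_of_pos (by norm_num)]
    omega
  rw [h4]

theorem pvGen_congr (d : Int) : ∀ (n : Nat) (i i' : Int), (4 : Int) ∣ (i - i') →
    pvGen d n i = pvGen d n i' := by
  intro n
  induction n with
  | zero => intro i i' _; rfl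
  | succ n ih =>
    intro i i' h
    simp only [pvGen]
    rw [pvName_congr (i + d) (i' + d) (by have := h; omega), ih (i + d) (i' + d) (by have := h; omega)]

theorem pvGen_append (d : Int) : ∀ (m n : Nat) (i : Int),
    pvGen d (m + n) i = pvGen d m i ++ pvGen d n (i + (m : Int) * d) := by
  intro m
  induction m with
  | zero => intro n i; simp [pvGen]
  | succ m ih =>
    intro n i
    have h1 : m + 1 + n = (m + n) + 1 := by omega
    rw [h1]
    simp only [pvGen, ih, List.cons_append]
    have h2 : i + ((m + 1 : Nat) : Int) * d = i + d + (m : Int) * d := by push_cast; ring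
    rw [h2]

theorem pvGen_take (d : Int) : ∀ (n m : Nat) (i : Int), m ≤ n →
    (pvGen d n i).take m = pvGen d m i := by
  intro n
  induction n with
  | zero => intro m i hm; interval_cases m; rfl
  | succ n ih =>
    intro m i hm
    cases m with
    | zero => rfl
    | succ m => simp only [pvGen, List.take_succ_cons]; rw [ih m (i + d) (by omega)]

-- ring built by the slice expressions equals the next four names
theorem ring_eq (i d : Int) (hd : d = 1 ∨ d = -1) (h0 : 0 ≤ i) (h4 : i < 4) :
    (if d == 1
      then PySem.List.slice (PySem.List.pyRepeat pvDirs 2) (some (i + 1)) (some (i + 5))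
      else PySem.List.slice (PySem.List.pyRepeat ((PySem.List.slice? pvDirs none none (-1)).getD []) 2) (some (4 - i)) (some (8 - i)))
    = pvGen d 4 i := by
  rcases hd with rfl | rfl <;> interval_cases i <;> decide

-- replicated ring plus remainder is one chunk
theorem chunk_eq (d : Int) : ∀ (q r : Nat) (i : Int), r ≤ 4 →
    (List.replicate q (pvGen d 4 i)).flatten ++ pvGen d r i = pvGen d (4 * q + r) i := by
  intro q
  induction q with
  | zero => intro r i hr; simp
  | succ q ih =>
    intro r i hr
    have h1 : 4 * (q + 1) + r = 4 + (4 * q + r) := by omega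
    rw [h1, pvGen_append d 4 (4 * q + r) i]
    rw [List.replicate_succ, List.flatten_cons, List.append_assoc]
    congr 1
    rw [show i + ((4 : Nat) : Int) * d = i + (4 : Int) * d from by push_cast; ring]
    rw [pvGen_congr d (4 * q + r) (i + (4 : Int) * d) i (⟨d, by ring⟩)]
    exact ih r i hr

-- B's fold: invariant iB ≡ iA (mod 4), 0 ≤ iB < 4
theorem lemB_outer : ∀ (steps : List Int) (parts : List String) (iB iA d : Int),
    (d = 1 ∨ d = -1) → 0 ≤ iB → iB < 4 → (4 : Int) ∣ (iB - iA) →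
    (steps.foldl
      (fun (st : List String × Int × Int) count =>
        if count > 0 then
          let ring := if st.2.2 == 1
            then PySem.List.slice (PySem.List.pyRepeat pvDirs 2) (some (st.2.1 + 1)) (some (st.2.1 + 5))
            else PySem.List.slice (PySem.List.pyRepeat ((PySem.List.slice? pvDirs none none (-1)).getD []) 2) (some (4 - st.2.1)) (some (8 - st.2.1))
          (st.1 ++ (PySem.List.pyRepeat ring (PySem.Int.floordiv count 4) ++ PySem.List.slice ring none (some (PySem.Int.mod count 4))),
           PySem.Int.mod (st.2.1 + st.2.2 * count) 4, st.2.2 * (-1))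
        else (st.1, st.2.1, st.2.2 * (-1)))
      (parts, (iB, d))).1
    = parts ++ pvSeqR d iA steps := by
  intro steps
  induction steps with
  | nil => intro parts iB iA d _ _ _ _; simp [pvSeqR]
  | cons c cs ih =>
    intro parts iB iA d hd h0 h4 hdvd
    rw [List.foldl_cons]
    by_cases hc : c > 0
    · simp only [hc, if_true]
      have hq : PySem.Int.floordiv c 4 = c / 4 := PySem.Int.floordiv_eq_ediv_of_pos (by norm_num)
      have hr : PySem.Int.mod c 4 = c % 4 := PySem.Int.mod_eq_emod_of_pos (by norm_num)
      have hE : (PySem.List.pyRepeat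
            (if d == 1
              then PySem.List.slice (PySem.List.pyRepeat pvDirs 2) (some (iB + 1)) (some (iB + 5))
              else PySem.List.slice (PySem.List.pyRepeat ((PySem.List.slice? pvDirs none none (-1)).getD []) 2) (some (4 - iB)) (some (8 - iB)))
            (PySem.Int.floordiv c 4) ++
          PySem.List.slice
            (if d == 1
              then PySem.List.slice (PySem.List.pyRepeat pvDirs 2) (some (iB + 1)) (some (iB + 5))
              else PySem.List.slice (PySem.List.pyRepeat ((PySem.List.slice? pvDirs none none (-1)).getD []) 2) (some (4 - iB)) (some (8 - iB)))
            none (some (PySem.Int.mod c 4)))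
          = pvGen d c.toNat iA := by
        rw [ring_eq iB d hd h0 h4]
        rw [show PySem.List.pyRepeat (pvGen d 4 iB) (PySem.Int.floordiv c 4)
              = (List.replicate (PySem.Int.floordiv c 4).toNat (pvGen d 4 iB)).flatten from by
            simp [PySem.List.pyRepeat]]
        have hb : (0 : Int) ≤ PySem.Int.mod c 4 := by rw [hr]; omega
        rw [PySem.List.slice_to _ hb]
        rw [pvGen_take d 4 (PySem.Int.mod c 4).toNat iB (by rw [hr]; omega)]
        rw [chunk_eq d _ _ iB (by rw [hr]; omega)]
        rw [show 4 * (PySem.Int.floordiv c 4).toNat + (PySem.Int.mod c 4).toNat = c.toNat from by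
            rw [hq, hr]; omega]
        exact pvGen_congr d c.toNat iB iA hdvd
      rw [hE]
      rw [ih (parts ++ pvGen d c.toNat iA) (PySem.Int.mod (iB + d * c) 4) (iA + (c.toNat : Int) * d) (d * -1)
        (by rcases hd with rfl | rfl <;> simp)
        (PySem.Int.mod_nonneg _ (by norm_num))
        (PySem.Int.mod_lt _ (by norm_num))
        (by
          rw [PySem.Int.mod_eq_emod_of_pos (by norm_num)]
          obtain ⟨t, ht⟩ := hdvd
          rcases hd with rfl | rfl <;> omega)]
      simp [pvSeqR]
    · simp only [hc, if_false]
      have hc0 : c.toNat = 0 := by omega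
      rw [ih parts iB (iA + (c.toNat : Int) * d) (d * -1)
        (by rcases hd with rfl | rfl <;> simp) h0 h4 (by rw [hc0]; simpa using hdvd)]
      simp [pvSeqR, hc0, pvGen]

-- ===== VERDICT (by name: the statement is the Claim_ definition above) =====
theorem movement_sequence_spec : Claim_equal_movement_sequence := by
  intro start_at clockwise steps _ hpre
  unfold Spec_movement_sequence
  obtain ⟨i0, h⟩ := Option.isSome_iff_exists.mp
    ((PySem.List.index?_isSome_iff pvDirs start_at).mpr hpre)
  have hlt : i0 < 4 := by
    obtain ⟨hk, -, -⟩ := PySem.List.getElem_of_index?_eq_some h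
    simpa [pvDirs] using hk
  unfold movement_sequence movement_sequence_alt
  rw [h]
  simp only
  rw [lemA_outer steps [start_at] (i0 : Int) (if clockwise then (-1 : Int) else 1)]
  rw [lemB_outer steps [start_at] (i0 : Int) (i0 : Int) (if clockwise then (-1 : Int) else 1)
    (by split <;> simp) (by positivity) (by exact_mod_cast hlt) (by simp)]
  simp [List.reverse_append]
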